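-- pv_equiv track=rewrite | github.com/supfisher/AirDL | demos/analyzers/traffic.py | process_loss_energy
-- ===== SOURCE A (Python) =====
-- def process_loss_energy(energy, loss):
--     energy_list = []
--     loss_list = []
--     for e, l in zip(energy, loss):
--         set_e = sorted(list(set(e)))
--         l = [l[e.index(v)] for v in set_e]
--         e = list(set_e)
--         energy_list.append(e)
--         loss_list.append(l)
--     return energy_list, loss_list
-- ===== SOURCE B (Python) =====
-- def process_loss_energy(energy, loss):
--     energy_list = []
--     loss_list = []
--     for e, l in zip(energy, loss):
--         es = []
--         ls = []
--         for v, w in sorted(zip(e, l), key=lambda p: p[0]):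
--             if not es or es[-1] != v:
--                 es.append(v)
--                 ls.append(w)
--         energy_list.append(es)
--         loss_list.append(ls)
--     return energy_list, loss_list
-- ===== Notes on version B (the rewrite author's own statement) =====
-- stated objective: faster
-- what changed: Instead of building set(e), sorting it and re-scanning e with e.index(v) for every value, B sorts the (energy, loss) pairs once per row by energy (stable) and emits the first pair of each equal-energy run in a single adjacent-dedup pass.
import Mathlib
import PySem

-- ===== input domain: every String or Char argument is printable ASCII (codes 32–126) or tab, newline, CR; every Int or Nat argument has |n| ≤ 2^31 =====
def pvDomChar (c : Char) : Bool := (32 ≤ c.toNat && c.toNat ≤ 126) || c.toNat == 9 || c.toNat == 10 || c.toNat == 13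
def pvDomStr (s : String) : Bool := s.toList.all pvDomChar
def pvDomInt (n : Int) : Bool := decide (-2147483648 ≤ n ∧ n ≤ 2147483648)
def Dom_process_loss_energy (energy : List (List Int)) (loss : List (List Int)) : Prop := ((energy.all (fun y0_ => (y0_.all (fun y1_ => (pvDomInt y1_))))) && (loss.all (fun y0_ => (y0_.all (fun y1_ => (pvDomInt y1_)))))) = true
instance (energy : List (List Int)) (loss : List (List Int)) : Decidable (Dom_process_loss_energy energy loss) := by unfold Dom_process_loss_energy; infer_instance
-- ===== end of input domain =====

-- B sorts the (energy, loss) pairs of each row once (stable, by energy) and keeps the first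
-- pair of each equal-energy run in one adjacent-dedup pass, instead of A's set()+sort plus a
-- per-value e.index(v) scan.
-- ===== PORT A =====
def process_loss_energy (energy : List (List Int)) (loss : List (List Int)) : List (List Int) × List (List Int) :=
  (List.zip energy loss).foldl (fun acc el =>
    let e := el.1
    let l := el.2
    let set_e := PySem.List.sorted (PySem.Set.ofList e) (fun x => x) false
    -- l[e.index(v)]: index? is e.index (always succeeds since v ∈ e); pyGet? is l[...]
    -- (none, i.e. Python's IndexError, is excluded by Pre_; .getD 0 is a total-form default only)
    let l' := set_e.map (fun v => (PySem.List.pyGet? l ((((PySem.List.index? e v).getD 0 : Nat)) : Int)).getD 0)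
    (acc.1 ++ [set_e], acc.2 ++ [l'])) ([], [])

-- ===== PORT B =====
def process_loss_energy_alt (energy : List (List Int)) (loss : List (List Int)) : List (List Int) × List (List Int) :=
  (List.zip energy loss).foldl (fun acc el =>
    -- for v, w in sorted(zip(e, l), key=lambda p: p[0]): if not es or es[-1] != v: append
    let row := (PySem.List.sorted (List.zip el.1 el.2) (fun p => p.1) false).foldl
      (fun r p => if r.1 = [] ∨ r.1.getLast? ≠ some p.1 then (r.1 ++ [p.1], r.2 ++ [p.2]) else r)
      ([], [])
    (acc.1 ++ [row.1], acc.2 ++ [row.2])) ([], [])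

-- ===== PRECONDITION & SPEC =====
-- Pre_ excludes exactly the inputs where Python A raises IndexError (a row's first-occurrence
-- index of some energy value falls beyond the paired loss row's length).
def Pre_process_loss_energy (energy : List (List Int)) (loss : List (List Int)) : Prop :=
  ∀ p ∈ List.zip energy loss, ∀ v ∈ p.1, v ∈ p.1.take p.2.length
instance (energy : List (List Int)) (loss : List (List Int)) : Decidable (Pre_process_loss_energy energy loss) := by unfold Pre_process_loss_energy; infer_instance
def pvWitness_process_loss_energy : List (List Int) × List (List Int) :=
  ([[3, 1, 3, 2]], [[10, 20, 30, 40]])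

def Spec_process_loss_energy (energy : List (List Int)) (loss : List (List Int)) (out : List (List Int) × List (List Int)) : Prop := out = process_loss_energy_alt energy loss
instance (energy : List (List Int)) (loss : List (List Int)) (out : List (List Int) × List (List Int)) : Decidable (Spec_process_loss_energy energy loss out) := by unfold Spec_process_loss_energy; infer_instance

-- ===== CLAIM (what is proved, stated in full; the proofs are below) =====
def Claim_equal_process_loss_energy : Prop := ∀ (energy : List (List Int)) (loss : List (List Int)), Dom_process_loss_energy energy loss → Pre_process_loss_energy energy loss → Spec_process_loss_energy energy loss (process_loss_energy energy loss)

-- ===== LEMMAS AND PROOFS =====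

-- B's inner loop body, named for the proofs (definitionally the lambda in the port)
def pvScanStep (r : List Int × List Int) (p : Int × Int) : List Int × List Int :=
  if r.1 = [] ∨ r.1.getLast? ≠ some p.1 then (r.1 ++ [p.1], r.2 ++ [p.2]) else r

-- the pairs B's scan keeps, as a recursion: keep p when its key differs from the last kept key
def pvKeep : Int → List (Int × Int) → List (Int × Int)
  | _, [] => []
  | w, p :: ps => if p.1 = w then pvKeep w ps else p :: pvKeep p.1 ps

def pvKeepAll : List (Int × Int) → List (Int × Int)
  | [] => []
  | p :: ps => p :: pvKeep p.1 ps

theorem pvScan_aux (qs : List (Int × Int)) : ∀ (es ls : List Int) (w : Int), es.getLast? = some w →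
    qs.foldl pvScanStep (es, ls) =
      (es ++ (pvKeep w qs).map (·.1), ls ++ (pvKeep w qs).map (·.2)) := by
  induction qs with
  | nil => intro es ls w _; simp [pvKeep]
  | cons p ps ih =>
    intro es ls w hlast
    have hne : es ≠ [] := by intro h; subst h; simp at hlast
    by_cases hpw : p.1 = w
    · have hstep : pvScanStep (es, ls) p = (es, ls) := by
        unfold pvScanStep
        rw [if_neg]
        simp [hne, hlast, hpw]
      simp only [List.foldl_cons, hstep, pvKeep, if_pos hpw]
      exact ih es ls w hlast
    · have hstep : pvScanStep (es, ls) p = (es ++ [p.1], ls ++ [p.2]) := by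
        unfold pvScanStep
        rw [if_pos]
        right
        simp [hlast]
        exact fun h => hpw h.symm
      simp only [List.foldl_cons, hstep, pvKeep, if_neg hpw]
      rw [ih (es ++ [p.1]) (ls ++ [p.2]) p.1 List.getLast?_concat]
      simp

theorem pvScan_eq (qs : List (Int × Int)) :
    qs.foldl pvScanStep ([], []) = ((pvKeepAll qs).map (·.1), (pvKeepAll qs).map (·.2)) := by
  cases qs with
  | nil => rfl
  | cons p ps =>
    have hstep : pvScanStep ([], []) p = ([p.1], [p.2]) := by
      unfold pvScanStep; rw [if_pos (Or.inl rfl)]; rfl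
    simp only [List.foldl_cons, hstep]
    rw [pvScan_aux ps [p.1] [p.2] p.1 (by rfl)]
    simp [pvKeepAll]

theorem pvKeep_eq_dropWhile (qs : List (Int × Int)) : ∀ w : Int,
    pvKeep w qs = pvKeepAll (qs.dropWhile (fun p => p.1 == w)) := by
  induction qs with
  | nil => intro w; rfl
  | cons p ps ih =>
    intro w
    by_cases hpw : p.1 = w
    · simp only [pvKeep, if_pos hpw, List.dropWhile_cons, show (p.1 == w) = true by simp [hpw]]
      exact ih w
    · simp only [pvKeep, if_neg hpw, List.dropWhile_cons, show (p.1 == w) = false by simp [hpw]]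
      rfl

theorem pvKeep_subset (qs : List (Int × Int)) : ∀ w : Int, pvKeep w qs ⊆ qs := by
  induction qs with
  | nil => intro w; simp [pvKeep]
  | cons p ps ih =>
    intro w x hx
    by_cases hpw : p.1 = w
    · rw [pvKeep, if_pos hpw] at hx
      exact List.mem_cons_of_mem p (ih w hx)
    · rw [pvKeep, if_neg hpw] at hx
      rcases List.mem_cons.mp hx with hx | hx
      · exact hx ▸ List.mem_cons_self
      · exact List.mem_cons_of_mem p (ih p.1 hx)

theorem pvKeepAll_subset (qs : List (Int × Int)) : pvKeepAll qs ⊆ qs := by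
  cases qs with
  | nil => simp [pvKeepAll]
  | cons p ps =>
    intro x hx
    rcases List.mem_cons.mp hx with hx | hx
    · exact hx ▸ List.mem_cons_self
    · exact List.mem_cons_of_mem p (pvKeep_subset ps p.1 hx)

theorem pvDropWhile_gt (qs : List (Int × Int)) (w : Int)
    (hs : qs.Pairwise (fun a b => a.1 ≤ b.1)) (hge : ∀ x ∈ qs, w ≤ x.1) :
    ∀ x ∈ qs.dropWhile (fun p => p.1 == w), w < x.1 := by
  induction qs with
  | nil => simp
  | cons d rest ih =>
    rw [List.pairwise_cons] at hs
    by_cases hdw : d.1 = w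
    · rw [List.dropWhile_cons, if_pos (by simp [hdw])]
      exact ih hs.2 (fun x hx => hdw ▸ hs.1 x hx)
    · rw [List.dropWhile_cons, if_neg (by simp [hdw])]
      intro x hx
      have hwd : w < d.1 := lt_of_le_of_ne (hge d List.mem_cons_self) (fun h => hdw h.symm)
      rcases List.mem_cons.mp hx with hx | hx
      · exact hx ▸ hwd
      · exact lt_of_lt_of_le hwd (hs.1 x hx)

-- the heart: on a key-sorted list, the kept pairs have strictly increasing keys, carry exactly
-- the keys of qs, and each kept pair is the head of its key's fiber in qs
theorem pvKeepAll_main : ∀ (n : Nat) (qs : List (Int × Int)), qs.length ≤ n →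
    qs.Pairwise (fun a b => a.1 ≤ b.1) →
    ((pvKeepAll qs).map (·.1)).Pairwise (· < ·) ∧
    (∀ v, v ∈ (pvKeepAll qs).map (·.1) ↔ v ∈ qs.map (·.1)) ∧
    (∀ r ∈ pvKeepAll qs, (qs.filter (fun p => p.1 == r.1)).head? = some r) := by
  intro n
  induction n with
  | zero =>
    intro qs hlen _
    have : qs = [] := List.eq_nil_of_length_eq_zero (Nat.le_zero.mp hlen)
    subst this
    refine ⟨by simp [pvKeepAll], by simp [pvKeepAll], by simp [pvKeepAll]⟩
  | succ n ih =>
    intro qs hlen hs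
    cases qs with
    | nil => refine ⟨by simp [pvKeepAll], by simp [pvKeepAll], by simp [pvKeepAll]⟩
    | cons p rest =>
      rw [List.pairwise_cons] at hs
      have hge : ∀ x ∈ rest, p.1 ≤ x.1 := hs.1
      have hgt : ∀ x ∈ rest.dropWhile (fun q => q.1 == p.1), p.1 < x.1 :=
        pvDropWhile_gt rest p.1 hs.2 hge
      have hdwlen : (rest.dropWhile (fun q => q.1 == p.1)).length ≤ n :=
        le_trans (List.length_dropWhile_le _ _) (by simpa using Nat.le_of_succ_le_succ hlen)
      have hdws : (rest.dropWhile (fun q => q.1 == p.1)).Pairwise (fun a b => a.1 ≤ b.1) :=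
        List.Pairwise.sublist (List.dropWhile_sublist _) hs.2
      obtain ⟨ih1, ih2, ih3⟩ := ih _ hdwlen hdws
      have hka : pvKeepAll (p :: rest) = p :: pvKeepAll (rest.dropWhile (fun q => q.1 == p.1)) := by
        rw [pvKeepAll, pvKeep_eq_dropWhile]
      have htw : ∀ x ∈ rest.takeWhile (fun q => q.1 == p.1), x.1 = p.1 := by
        intro x hx
        have := List.mem_takeWhile_imp hx
        simpa using this
      have hrest : rest = rest.takeWhile (fun q => q.1 == p.1) ++ rest.dropWhile (fun q => q.1 == p.1) :=
        (List.takeWhile_append_dropWhile).symm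
      refine ⟨?_, ?_, ?_⟩
      · rw [hka]
        simp only [List.map_cons, List.pairwise_cons]
        refine ⟨?_, ih1⟩
        intro v hv
        rw [ih2] at hv
        obtain ⟨x, hx, hxv⟩ := List.mem_map.mp hv
        exact hxv ▸ hgt x hx
      · intro v
        rw [hka]
        simp only [List.map_cons, List.mem_cons]
        constructor
        · rintro (h | h)
          · exact Or.inl h
          · right
            rw [ih2] at h
            obtain ⟨x, hx, hxv⟩ := List.mem_map.mp h
            exact List.mem_map.mpr ⟨x, (List.dropWhile_sublist _).subset hx, hxv⟩
        · rintro (h | h)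
          · exact Or.inl h
          · obtain ⟨x, hx, hxv⟩ := List.mem_map.mp h
            rw [hrest, List.mem_append] at hx
            rcases hx with hx | hx
            · exact Or.inl (hxv ▸ htw x hx)
            · exact Or.inr ((ih2 v).mpr (List.mem_map.mpr ⟨x, hx, hxv⟩))
      · intro r hr
        rw [hka] at hr
        rcases List.mem_cons.mp hr with hr | hr
        · subst hr
          rw [List.filter_cons, if_pos (by simp)]
          rfl
        · have hrdw : r ∈ rest.dropWhile (fun q => q.1 == p.1) :=
            pvKeepAll_subset _ hr
          have hrgt : p.1 < r.1 := hgt r hrdw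
          rw [List.filter_cons, if_neg (by simp; omega)]
          conv_lhs => rw [hrest]
          rw [List.filter_append]
          have htwf : (rest.takeWhile (fun q => q.1 == p.1)).filter (fun q => q.1 == r.1) = [] := by
            rw [List.filter_eq_nil_iff]
            intro x hx
            have := htw x hx
            simp only [beq_iff_eq, this]
            omega
          rw [htwf, List.nil_append]
          exact ih3 r hr

-- stability, as fiber preservation: inserting x into a key-sorted acc appends x to its own fiber
theorem pvInsertBy_filter (x : Int × Int) (acc : List (Int × Int))
    (hacc : acc.Pairwise (fun a b => a.1 ≤ b.1)) (v : Int) :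
    (PySem.List.insertBy (fun a b => decide (a.1 < b.1)) x acc).filter (fun p => p.1 == v) =
      acc.filter (fun p => p.1 == v) ++ if x.1 = v then [x] else [] := by
  induction acc with
  | nil =>
    simp only [PySem.List.insertBy, List.nil_append, List.filter_nil]
    by_cases hv : x.1 = v <;> simp [hv]
  | cons y ys ihy =>
    rw [List.pairwise_cons] at hacc
    by_cases hlt : x.1 < y.1
    · rw [show PySem.List.insertBy (fun a b => decide (a.1 < b.1)) x (y :: ys) = x :: y :: ys by
        simp [PySem.List.insertBy, hlt]]
      by_cases hv : x.1 = v
      · have hys : (ys.filter (fun p => p.1 == v)) = [] := by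
          rw [List.filter_eq_nil_iff]
          intro z hz
          have := hacc.1 z hz
          simp only [beq_iff_eq]
          omega
        have hy : (y.1 == v) = false := by simp; omega
        simp [hv, hy, hys]
      · have hx : (x.1 == v) = false := by simp [hv]
        simp [List.filter_cons, hx, hv]
    · rw [show PySem.List.insertBy (fun a b => decide (a.1 < b.1)) x (y :: ys) =
          y :: PySem.List.insertBy (fun a b => decide (a.1 < b.1)) x ys by
        simp [PySem.List.insertBy, hlt]]
      rw [List.filter_cons, List.filter_cons, ihy hacc.2]
      by_cases hy : (y.1 == v) = true <;> simp [hy]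

theorem pvSorted_append_singleton (ps : List (Int × Int)) (x : Int × Int) :
    PySem.List.sorted (ps ++ [x]) (fun p => p.1) false =
      PySem.List.insertBy (fun a b => decide (a.1 < b.1)) x
        (PySem.List.sorted ps (fun p => p.1) false) := by
  rw [PySem.List.sorted_eq_foldl_insertBy, PySem.List.sorted_eq_foldl_insertBy, List.foldl_append]
  rfl

-- the stable sort preserves every key's fiber
theorem pvSorted_filter_fiber (ps : List (Int × Int)) (v : Int) :
    (PySem.List.sorted ps (fun p => p.1) false).filter (fun p => p.1 == v) =
      ps.filter (fun p => p.1 == v) := by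
  induction ps using List.reverseRecOn with
  | nil => rfl
  | append_singleton ps x ih =>
    rw [pvSorted_append_singleton,
      pvInsertBy_filter x _ (PySem.List.sorted_pairwise ps (fun p => p.1)) v,
      ih, List.filter_append]
    by_cases hv : x.1 = v
    · simp [hv]
    · simp [hv]

theorem pvMap_fst_zip (e : List Int) : ∀ l : List Int, (List.zip e l).map (·.1) = e.take l.length := by
  induction e with
  | nil => intro l; simp
  | cons x e' ih =>
    intro l
    cases l with
    | nil => simp
    | cons y l' => simp [ih l']

theorem pvZip_fiber_head (e : List Int) : ∀ (l : List Int) (v : Int) (k : Nat),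
    PySem.List.index? e v = some k → ∀ hk : k < l.length,
    ((List.zip e l).filter (fun p => p.1 == v)).head? = some (v, l[k]) := by
  induction e with
  | nil => intro l v k hidx; simp [PySem.List.index?] at hidx
  | cons x e' ih =>
    intro l v k hidx hk
    by_cases hxv : x = v
    · subst hxv
      rw [PySem.List.index?_cons_self] at hidx
      have hk0 : k = 0 := by simpa using hidx.symm
      subst hk0
      cases l with
      | nil => simp at hk
      | cons y l' => simp
    · rw [PySem.List.index?_cons_of_ne e' hxv] at hidx
      cases hidx' : PySem.List.index? e' v with
      | none => rw [hidx'] at hidx; simp at hidx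
      | some k' =>
        rw [hidx'] at hidx
        simp only [Option.map_some, Option.some.injEq] at hidx
        subst hidx
        cases l with
        | nil => simp at hk
        | cons y l' =>
          have hk' : k' < l'.length := by simpa using hk
          rw [List.zip_cons_cons, List.filter_cons, if_neg (by simp [hxv])]
          rw [ih l' v k' hidx' hk']
          simp

theorem pvIdx_lt_of_mem_take (e : List Int) (v : Int) (n k : Nat)
    (hidx : PySem.List.index? e v = some k) (hmem : v ∈ e.take n) : k < n := by
  obtain ⟨hk, hek, hmin⟩ := PySem.List.getElem_of_index?_eq_some hidx
  obtain ⟨j, hj, hje⟩ := List.getElem_of_mem hmem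
  have hjlen : j < e.length := lt_of_lt_of_le hj (by simp)
  have hjn : j < n := lt_of_lt_of_le hj (by simp)
  rw [List.getElem_take] at hje
  by_cases hkj : k ≤ j
  · omega
  · exact absurd hje (hmin j (by omega))

-- per-row equality: B's scan of the sorted zipped row equals A's (sorted set, first-loss map)
theorem pvRow_eq (e l : List Int) (h : ∀ v ∈ e, v ∈ e.take l.length) :
    (PySem.List.sorted (List.zip e l) (fun p => p.1) false).foldl pvScanStep ([], []) =
      (PySem.List.sorted (PySem.Set.ofList e) (fun x => x) false,
       (PySem.List.sorted (PySem.Set.ofList e) (fun x => x) false).map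
         (fun v => (PySem.List.pyGet? l ((((PySem.List.index? e v).getD 0 : Nat)) : Int)).getD 0)) := by
  set qs := PySem.List.sorted (List.zip e l) (fun p => p.1) false with hqs
  have hP : qs.Pairwise (fun a b => a.1 ≤ b.1) := PySem.List.sorted_pairwise _ _
  obtain ⟨hlt, hmem, hfib⟩ := pvKeepAll_main qs.length qs le_rfl hP
  set S := PySem.List.sorted (PySem.Set.ofList e) (fun x => x) false with hS
  -- membership of kept keys ↔ membership in e
  have hqsmem : ∀ v : Int, v ∈ qs.map (·.1) ↔ v ∈ e.take l.length := by
    intro v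
    rw [((PySem.List.sorted_perm (List.zip e l) (fun p => p.1) false).map (·.1)).mem_iff,
      pvMap_fst_zip]
  have hmem' : ∀ v : Int, v ∈ (pvKeepAll qs).map (·.1) ↔ v ∈ e := by
    intro v
    rw [hmem v, hqsmem v]
    exact ⟨fun hv => List.mem_of_mem_take hv, fun hv => h v hv⟩
  have hSlt : S.Pairwise (· < ·) := PySem.List.sorted_ofList_pairwise_lt e
  have hSmem : ∀ v : Int, v ∈ S ↔ v ∈ e := by
    intro v
    rw [hS, PySem.List.mem_sorted, PySem.Set.mem_ofList]
  -- the kept key list IS A's sorted set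
  have hKS : (pvKeepAll qs).map (·.1) = S := by
    have hnd1 : ((pvKeepAll qs).map (·.1)).Nodup := hlt.imp (fun {a b} hab => ne_of_lt hab)
    have hnd2 : S.Nodup := hSlt.imp (fun {a b} hab => ne_of_lt hab)
    have hperm : ((pvKeepAll qs).map (·.1)).Perm S :=
      (List.perm_ext_iff_of_nodup hnd1 hnd2).mpr (fun v => by rw [hmem' v, hSmem v])
    exact PySem.List.eq_of_perm_of_pairwise_le_of_injective (fun x : Int => x)
      (fun _ _ hab => hab) hperm
      (hlt.imp (fun {a b} hab => le_of_lt hab)) (hSlt.imp (fun {a b} hab => le_of_lt hab))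
  -- each kept pair's loss is A's first-occurrence loss
  have hsnd : ∀ r ∈ pvKeepAll qs, r.2 =
      (PySem.List.pyGet? l ((((PySem.List.index? e r.1).getD 0 : Nat)) : Int)).getD 0 := by
    intro r hr
    have hhead := hfib r hr
    rw [hqs, pvSorted_filter_fiber] at hhead
    have hre : r.1 ∈ e := (hmem' r.1).mp (List.mem_map.mpr ⟨r, hr, rfl⟩)
    obtain ⟨k, hidx⟩ := Option.isSome_iff_exists.mp
      ((PySem.List.index?_isSome_iff e r.1).mpr hre)
    have hkl : k < l.length := pvIdx_lt_of_mem_take e r.1 l.length k hidx (h r.1 hre)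
    rw [pvZip_fiber_head e l r.1 k hidx hkl] at hhead
    have hr2 : r.2 = l[k] := by
      have h3 : (r.1, l[k]) = r := by injection hhead
      exact (congrArg Prod.snd h3).symm
    rw [hr2, hidx]
    simp only [Option.getD_some, PySem.List.pyGet?_natCast]
    rw [List.getElem?_eq_getElem hkl]
    rfl
  rw [pvScan_eq, hKS]
  refine Prod.ext rfl ?_
  show (pvKeepAll qs).map (·.2) = _
  rw [List.map_congr_left (fun r hr => hsnd r hr), ← hKS, List.map_map]
  rfl

-- ===== VERDICT (by name: the statement is the Claim_ definition above) =====
theorem process_loss_energy_spec : Claim_equal_process_loss_energy := by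
  intro energy loss _ hpre
  unfold Spec_process_loss_energy process_loss_energy process_loss_energy_alt
  have htop : ∀ (L : List (List Int × List Int)), (∀ p ∈ L, ∀ v ∈ p.1, v ∈ p.1.take p.2.length) →
      ∀ (a b : List (List Int)),
      L.foldl (fun acc el =>
        let e := el.1
        let l := el.2
        let set_e := PySem.List.sorted (PySem.Set.ofList e) (fun x => x) false
        let l' := set_e.map (fun v => (PySem.List.pyGet? l ((((PySem.List.index? e v).getD 0 : Nat)) : Int)).getD 0)
        (acc.1 ++ [set_e], acc.2 ++ [l'])) (a, b) =
      L.foldl (fun acc el =>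
        let row := (PySem.List.sorted (List.zip el.1 el.2) (fun p => p.1) false).foldl
          (fun r p => if r.1 = [] ∨ r.1.getLast? ≠ some p.1 then (r.1 ++ [p.1], r.2 ++ [p.2]) else r)
          ([], [])
        (acc.1 ++ [row.1], acc.2 ++ [row.2])) (a, b) := by
    intro L hL
    induction L with
    | nil => intro a b; rfl
    | cons el L ihL =>
      intro a b
      have hrow := pvRow_eq el.1 el.2 (hL el List.mem_cons_self)
      simp only [List.foldl_cons]
      have hstep : ((PySem.List.sorted (List.zip el.1 el.2) (fun p => p.1) false).foldl
          (fun r p => if r.1 = [] ∨ r.1.getLast? ≠ some p.1 then (r.1 ++ [p.1], r.2 ++ [p.2]) else r)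
          ([], [])) =
          (PySem.List.sorted (PySem.Set.ofList el.1) (fun x => x) false,
           (PySem.List.sorted (PySem.Set.ofList el.1) (fun x => x) false).map
             (fun v => (PySem.List.pyGet? el.2 ((((PySem.List.index? el.1 v).getD 0 : Nat)) : Int)).getD 0)) := by
        rw [← hrow]; rfl
      rw [hstep]
      exact ihL (fun p hp => hL p (List.mem_cons_of_mem el hp)) _ _
  exact htop (List.zip energy loss) hpre [] []
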